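-- pv_equiv track=rewrite | github.com/rightthumb/rightthumb-widgets-v0 | widgets/python/_rightThumb/_base3/library/tools/code/functions/indexText.py | indexText
-- ===== SOURCE A (Python) =====
-- def indexText(text):
--     allowed_chars = set('0123456789abcdefghijklmnopqrstuvwxyzABCDEFGHIJKLMNOPQRSTUVWXYZ_.')
--     index = {}
--     start = None
--
--     for i, char in enumerate(text):
--         if char in allowed_chars:
--             if start is None:
--                 start = i
--         else:
--             if start is not None:
--                 index[start] = i
--                 start = None
--
--     if start is not None:
--         index[start] = len(text)
--
--     return index
-- ===== SOURCE B (Python) =====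
-- def indexText(text):
--     allowed = '0123456789abcdefghijklmnopqrstuvwxyzABCDEFGHIJKLMNOPQRSTUVWXYZ_.'
--     index = {}
--     i, n = 0, len(text)
--     while i < n:
--         if text[i] in allowed:
--             j = i + 1
--             while j < n and text[j] in allowed:
--                 j += 1
--             index[i] = j
--             i = j
--         else:
--             i += 1
--     return index
-- ===== Notes on version B (the rewrite author's own statement) =====
-- stated objective: alternative
-- what changed: Replaces A's single enumerate loop that threads an optional run-beginning marker through every character by a finditer-style scanner: an outer position loop that, on hitting an allowed character, consumes the whole maximal run with an inner loop and records the pair of run boundaries at once, so no optional state is threaded.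
import Mathlib
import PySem

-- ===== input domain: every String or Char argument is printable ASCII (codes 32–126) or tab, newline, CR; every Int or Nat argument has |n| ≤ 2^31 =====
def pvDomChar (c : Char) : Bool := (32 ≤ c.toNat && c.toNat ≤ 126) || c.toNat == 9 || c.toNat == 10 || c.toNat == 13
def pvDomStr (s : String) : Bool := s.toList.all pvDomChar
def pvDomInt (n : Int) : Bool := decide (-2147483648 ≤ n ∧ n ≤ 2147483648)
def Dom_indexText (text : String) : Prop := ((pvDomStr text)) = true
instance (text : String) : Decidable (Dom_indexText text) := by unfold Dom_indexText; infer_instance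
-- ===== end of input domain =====

-- B replaces A's enumerate loop with an Optional start state by a run scanner that
-- consumes each maximal allowed run at once (alternative decomposition, same cost).

-- ===== PORT A =====
def indexText (text : String) : List (Int × Int) :=
  let allowedChars : PySem.Set Char :=
    PySem.Set.ofList "0123456789abcdefghijklmnopqrstuvwxyzABCDEFGHIJKLMNOPQRSTUVWXYZ_.".toList
  let st :=
    (PySem.List.enumerate text.toList).foldl
      (fun (st : PySem.Dict Int Int × Option Int) p =>
        if PySem.Set.contains allowedChars p.2 then
          match st.2 with
          | none => (st.1, some p.1)
          | some _ => st
        else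
          match st.2 with
          | some s => (st.1.insert s p.1, none)
          | none => st)
      (PySem.Dict.empty, none)
  (match st.2 with
   | some s => st.1.insert s (PySem.Str.len text)
   | none => st.1).items

-- ===== PORT B =====
def pvAllowedB : List Char :=
  "0123456789abcdefghijklmnopqrstuvwxyzABCDEFGHIJKLMNOPQRSTUVWXYZ_.".toList

-- inner while loop of B: advance j past the run, return (j, remaining chars)
def pvRunSplit : List Char → Int → Int × List Char
  | [], j => (j, [])
  | c :: rest, j => if pvAllowedB.contains c then pvRunSplit rest (j + 1) else (j, c :: rest)

theorem pvRunSplit_len_le : ∀ (l : List Char) (j : Int), (pvRunSplit l j).2.length ≤ l.length := by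
  intro l
  induction l with
  | nil => intro j; simp [pvRunSplit]
  | cons c rest ih =>
    intro j
    simp only [pvRunSplit]
    split
    · exact le_trans (ih (j + 1)) (Nat.le_succ _)
    · simp

-- outer while loop of B
def pvFindRuns : List Char → Int → List (Int × Int)
  | [], _ => []
  | c :: rest, i =>
    if pvAllowedB.contains c then
      let p := pvRunSplit rest (i + 1)
      (i, p.1) :: pvFindRuns p.2 p.1
    else pvFindRuns rest (i + 1)
  termination_by l => l.length
  decreasing_by
  · exact Nat.lt_succ_of_le (pvRunSplit_len_le rest (i + 1))
  · simp

def indexText_alt (text : String) : List (Int × Int) := pvFindRuns text.toList 0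

-- ===== PRECONDITION & SPEC =====
def Spec_indexText (text : String) (out : List (Int × Int)) : Prop := out = indexText_alt text
instance (text : String) (out : List (Int × Int)) : Decidable (Spec_indexText text out) := by unfold Spec_indexText; infer_instance

-- ===== CLAIM (what is proved, stated in full; the proofs are below) =====
def Claim_equal_indexText : Prop := ∀ (text : String), Dom_indexText text → Spec_indexText text (indexText text)

-- ===== LEMMAS AND PROOFS =====


-- proof-only helpers: A's loop body, the continuation of B's scanner, A's finalization
def pvStepA (st : PySem.Dict Int Int × Option Int) (p : Int × Char) :
    PySem.Dict Int Int × Option Int :=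
  if pvAllowedB.contains p.2 then
    match st.2 with
    | none => (st.1, some p.1)
    | some _ => st
  else
    match st.2 with
    | some s => (st.1.insert s p.1, none)
    | none => st

def pvCont : Option Int → List Char → Int → List (Int × Int)
  | none, l, i => pvFindRuns l i
  | some s, l, i =>
      (s, (pvRunSplit l i).1) :: pvFindRuns (pvRunSplit l i).2 (pvRunSplit l i).1

def pvFin (st : PySem.Dict Int Int × Option Int) (n : Int) : List (Int × Int) :=
  (match st.2 with
   | some s => st.1.insert s n
   | none => st.1).items

def pvBound : Option Int → Int → Int
  | none, i => i
  | some s, _ => s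

set_option maxRecDepth 4000 in
theorem pvAllowedSet_eq :
    PySem.Set.ofList "0123456789abcdefghijklmnopqrstuvwxyzABCDEFGHIJKLMNOPQRSTUVWXYZ_.".toList
      = pvAllowedB := by decide

theorem pvNotContains (d : PySem.Dict Int Int) (s : Int)
    (h : ∀ k ∈ d.keys, k < s) : d.contains s = false := by
  rw [PySem.Dict.contains_eq_decide_mem_keys]
  simp only [decide_eq_false_iff_not]
  intro hs
  exact absurd (h s hs) (lt_irrefl s)

theorem pvMain : ∀ (l : List Char) (i : Int) (d : PySem.Dict Int Int) (st : Option Int),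
    (∀ k ∈ d.keys, k < pvBound st i) →
    (∀ s, st = some s → s < i) →
    pvFin ((PySem.List.enumerate l i).foldl pvStepA (d, st)) (i + l.length)
      = d.items ++ pvCont st l i := by
  intro l
  induction l with
  | nil =>
    intro i d st hk hs
    rw [PySem.List.enumerate_nil]
    cases st with
    | none => simp [pvFin, pvCont, pvFindRuns]
    | some s =>
      simp only [List.foldl_nil, pvFin, pvCont, pvRunSplit, pvFindRuns]
      rw [PySem.Dict.items_insert_of_not_contains _ _ (pvNotContains d s hk)]
      simp
  | cons c rest ih =>
    intro i d st hk hs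
    rw [PySem.List.enumerate_cons, List.foldl_cons]
    have hlen : i + ((c :: rest).length : Int) = (i + 1) + (rest.length : Int) := by
      simp only [List.length_cons]; push_cast; ring
    rw [hlen]
    by_cases hc : c ∈ pvAllowedB
    · cases st with
      | none =>
        have hstep : pvStepA (d, none) (i, c) = (d, some i) := by
          simp [pvStepA, hc]
        rw [hstep, ih (i + 1) d (some i)
          (by simpa [pvBound] using hk)
          (by intro s h; cases h; omega)]
        simp [pvCont, pvFindRuns, hc]
      | some s =>
        have hstep : pvStepA (d, some s) (i, c) = (d, some s) := by
          simp [pvStepA, hc]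
        have hsi : s < i := hs s rfl
        rw [hstep, ih (i + 1) d (some s)
          (by simpa [pvBound] using hk)
          (by intro t h; cases h; omega)]
        simp [pvCont, pvRunSplit, hc]
    · cases st with
      | none =>
        have hstep : pvStepA (d, none) (i, c) = (d, none) := by
          simp [pvStepA, hc]
        rw [hstep, ih (i + 1) d none
          (by intro k hkk; have := hk k hkk; simp [pvBound] at this ⊢; omega)
          (by intro s h; cases h)]
        simp [pvCont, pvFindRuns, hc]
      | some s =>
        have hsi : s < i := hs s rfl
        have hkd : ∀ k ∈ d.keys, k < s := by simpa [pvBound] using hk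
        have hstep : pvStepA (d, some s) (i, c) = (d.insert s i, none) := by
          simp [pvStepA, hc]
        rw [hstep, ih (i + 1) (d.insert s i) none
          (by
            intro k hkk
            simp only [pvBound]
            rcases (PySem.Dict.mem_keys_insert d s k i).1 hkk with h | h
            · omega
            · have := hkd k h; omega)
          (by intro t h; cases h)]
        rw [PySem.Dict.items_insert_of_not_contains _ _ (pvNotContains d s hkd)]
        simp [pvCont, pvRunSplit, pvFindRuns, hc]

-- ===== VERDICT =====
theorem indexText_spec : Claim_equal_indexText := by
  intro text _
  unfold Spec_indexText indexText indexText_alt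
  rw [pvAllowedSet_eq]
  have h := pvMain text.toList 0 PySem.Dict.empty none
    (by simp [pvBound, PySem.Dict.keys_empty]) (by intro s h; cases h)
  simp only [pvFin, pvCont] at h
  have hlen : PySem.Str.len text = 0 + (text.toList.length : Int) := by
    simp [PySem.Str.len]
  rw [hlen]
  convert h using 2
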